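-- pv_equiv track=rewrite | github.com/artisan1218/LeetCode-Solution | solutions/maxPointsWithCost/maxPointsWithCost.py | maxPointsDP
-- ===== SOURCE A (Python) =====
-- from typing import List
--
-- def maxPointsDP(points: List[List[int]]) -> int:
--     rows = len(points)
--     cols = len(points[0])
--
--     dp = points[0]
--     left = [0] * cols
--     right = [0] * cols
--
--     for r in range(1, rows):
--         for c in range(cols):
--             if c==0:
--                 left[c] = dp[c]
--             else:
--                 # the key is we decrement the left value by 1 each time and compare it with the value
--                 # right above c to pick the larger one.
--                 left[c] = max(left[c-1]-1, dp[c])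
--         for c in range(cols-1, -1, -1):
--             if c==cols-1:
--                 right[c] = dp[c]
--             else:
--                 right[c] = max(right[c+1]-1, dp[c])
--         # for the current level dp, calculate the sum by adding current value and the larger value
--         # from either left scan or right scan.
--         for c in range(cols):
--             dp[c] = points[r][c] + max(left[c], right[c])
--     return max(dp)
-- ===== SOURCE B (Python) =====
-- from typing import List
--
-- def maxPointsDP(points: List[List[int]]) -> int:
--     # dp aliases points[0]; row updates are written back in place, as in A
--     dp = points[0]
--     cols = len(dp)
--     for r in range(1, len(points)):
--         row = points[r]
--         new_dp = [row[c] + max(dp[c2] - abs(c - c2) for c2 in range(cols))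
--                   for c in range(cols)]
--         dp[:] = new_dp
--     return max(dp)
-- ===== Notes on version B (the rewrite author's own statement) =====
-- stated objective: simpler
-- what changed: Replaces A's left/right decremented-prefix-scan trick with the direct quadratic-per-row DP: each new cell takes the explicit maximum of dp[c2] - |c - c2| over all columns.
import Mathlib
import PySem

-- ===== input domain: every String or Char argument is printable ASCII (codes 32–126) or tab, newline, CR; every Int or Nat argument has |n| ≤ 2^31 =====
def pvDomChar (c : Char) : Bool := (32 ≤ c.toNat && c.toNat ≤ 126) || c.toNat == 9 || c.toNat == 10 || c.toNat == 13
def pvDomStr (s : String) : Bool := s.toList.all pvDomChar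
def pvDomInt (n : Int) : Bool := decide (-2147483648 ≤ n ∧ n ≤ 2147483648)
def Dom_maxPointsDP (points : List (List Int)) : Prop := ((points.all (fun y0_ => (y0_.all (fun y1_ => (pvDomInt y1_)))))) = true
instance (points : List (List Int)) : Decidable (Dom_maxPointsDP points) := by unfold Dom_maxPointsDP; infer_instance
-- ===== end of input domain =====

-- B replaces A's left/right decremented-scan trick with the direct quadratic-per-row
-- maximum over all columns; both Pythons mutate points[0] in place identically, and the
-- equivalence proved here is about the return value.

-- ===== PORT A =====
-- Python max(list) on a nonempty list; 0 only on [] (excluded by Pre_).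
def pyMax1 : List Int → Int
  | [] => 0
  | v :: vs => vs.foldl max v

-- A's forward scan: left[0] = dp[0]; left[c] = max(left[c-1]-1, dp[c]).
def leftAux (prev : Int) : List Int → List Int
  | [] => []
  | d :: ds => (max (prev - 1) d) :: leftAux (max (prev - 1) d) ds

def leftScan : List Int → List Int
  | [] => []
  | d :: ds => d :: leftAux d ds

-- A's backward scan: right[cols-1] = dp[cols-1]; right[c] = max(right[c+1]-1, dp[c]).
def rightScan : List Int → List Int
  | [] => []
  | d :: ds =>
    match rightScan ds with
    | [] => [d]
    | r :: rs => max (r - 1) d :: r :: rs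

-- one iteration of A's row loop: dp[c] = points[r][c] + max(left[c], right[c])
def stepA (dp row : List Int) : List Int :=
  let left := leftScan dp
  let right := rightScan dp
  (List.range dp.length).map (fun c => row.getD c 0 + max (left.getD c 0) (right.getD c 0))

def maxPointsDP (points : List (List Int)) : Int :=
  match points with
  | [] => 0
  | dp0 :: rest => pyMax1 (rest.foldl stepA dp0)

-- ===== PORT B =====
-- max(dp[c2] - abs(c - c2) for c2 in range(cols))
def rowBest (dp : List Int) (c : Nat) : Int :=
  pyMax1 ((List.range dp.length).map (fun c2 => dp.getD c2 0 - (((c : Int) - (c2 : Int)).natAbs : Int)))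

-- one iteration of B's row loop (the comprehension written back with dp[:] = new_dp)
def stepB (dp row : List Int) : List Int :=
  (List.range dp.length).map (fun c => row.getD c 0 + rowBest dp c)

def maxPointsDP_alt (points : List (List Int)) : Int :=
  match points with
  | [] => 0
  | dp0 :: rest => pyMax1 (rest.foldl stepB dp0)

-- ===== PRECONDITION & SPEC =====
-- Pre_ excludes exactly the inputs on which the Python A raises: empty points
-- (IndexError on points[0]), an empty first row (ValueError on max of empty / IndexError),
-- and a later row shorter than the first (IndexError on points[r][c]).
def Pre_maxPointsDP (points : List (List Int)) : Prop :=
  points ≠ [] ∧ points.headD [] ≠ [] ∧ ∀ r ∈ points, (points.headD []).length ≤ r.length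
instance (points : List (List Int)) : Decidable (Pre_maxPointsDP points) := by
  unfold Pre_maxPointsDP; infer_instance

def pvWitness_maxPointsDP : List (List Int) := [[1, 2, 3], [4, -1, 0]]

def Spec_maxPointsDP (points : List (List Int)) (out : Int) : Prop := out = maxPointsDP_alt points
instance (points : List (List Int)) (out : Int) : Decidable (Spec_maxPointsDP points out) := by
  unfold Spec_maxPointsDP; infer_instance

-- ===== CLAIM (what is proved, stated in full; the proofs are below) =====
def Claim_equal_maxPointsDP : Prop := ∀ (points : List (List Int)), Dom_maxPointsDP points → Pre_maxPointsDP points → Spec_maxPointsDP points (maxPointsDP points)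

-- ===== LEMMAS AND PROOFS =====

-- maximum of f 0, ..., f n
def maxRange (f : Nat → Int) : Nat → Int
  | 0 => f 0
  | n + 1 => max (maxRange f n) (f (n + 1))

theorem maxRange_congr (f g : Nat → Int) (n : Nat) (h : ∀ j ≤ n, f j = g j) :
    maxRange f n = maxRange g n := by
  induction n with
  | zero => simp [maxRange, h 0 (by omega)]
  | succ k ih =>
    simp [maxRange, ih (fun j hj => h j (by omega)), h (k + 1) (by omega)]

theorem maxRange_front (f : Nat → Int) (k : Nat) :
    maxRange f (k + 1) = max (f 0) (maxRange (fun j => f (j + 1)) k) := by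
  induction k with
  | zero => simp [maxRange]
  | succ m ih =>
    show max (maxRange f (m + 1)) (f (m + 2)) = _
    rw [ih]
    simp [maxRange, max_assoc]

theorem self_le_maxRange (f : Nat → Int) (n : Nat) : f n ≤ maxRange f n := by
  cases n with
  | zero => simp [maxRange]
  | succ m => simp [maxRange]

theorem maxRange_split (f : Nat → Int) (c k : Nat) :
    maxRange f (c + k) = max (maxRange f c) (maxRange (fun j => f (c + j)) k) := by
  induction k with
  | zero =>
    have := self_le_maxRange f c
    simp [maxRange]; omega
  | succ m ih =>
    show max (maxRange f (c + m)) (f (c + (m + 1))) = _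
    rw [ih]
    simp [maxRange, max_assoc]

theorem maxRange_sub_const (f : Nat → Int) (a : Int) (n : Nat) :
    maxRange (fun j => f j - a) n = maxRange f n - a := by
  induction n with
  | zero => simp [maxRange]
  | succ m ih => simp [maxRange, ih]; omega

theorem pyMax1_append_singleton (l : List Int) (a : Int) (h : l ≠ []) :
    pyMax1 (l ++ [a]) = max (pyMax1 l) a := by
  cases l with
  | nil => simp at h
  | cons v vs => simp [pyMax1, List.foldl_append]

theorem pyMax1_range_map (f : Nat → Int) (n : Nat) :
    pyMax1 ((List.range (n + 1)).map f) = maxRange f n := by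
  induction n with
  | zero => simp [pyMax1, maxRange, List.range_succ]
  | succ m ih =>
    rw [List.range_succ, List.map_append]
    rw [show List.map f [m + 1] = [f (m + 1)] from rfl]
    rw [pyMax1_append_singleton _ _ (by simp), ih]
    rfl

-- pulling the head element out of the left-scan specification
theorem maxRange_shift_getD (d : Int) (ds : List Int) (k : Nat) :
    maxRange (fun j => (d :: ds).getD j 0 - (((k + 1 : Nat) : Int) - (j : Int))) (k + 1)
      = max (d - ((k : Int) + 1)) (maxRange (fun j => ds.getD j 0 - ((k : Int) - (j : Int))) k) := by
  rw [maxRange_front]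
  have h2 : maxRange (fun j => (d :: ds).getD (j + 1) 0 - (((k + 1 : Nat) : Int) - ((j + 1 : Nat) : Int))) k
      = maxRange (fun j => ds.getD j 0 - ((k : Int) - (j : Int))) k := by
    apply maxRange_congr
    intro j hj
    simp only [List.getD_cons_succ]
    push_cast
    ring
  rw [h2]
  generalize maxRange (fun j => ds.getD j 0 - ((k : Int) - (j : Int))) k = M
  simp only [List.getD_cons_zero]
  push_cast
  omega

theorem leftAux_getD (ds : List Int) (prev : Int) (c : Nat) (hc : c < ds.length) :
    (leftAux prev ds).getD c 0 =
      max (prev - ((c : Int) + 1)) (maxRange (fun j => ds.getD j 0 - ((c : Int) - (j : Int))) c) := by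
  induction ds generalizing prev c with
  | nil => simp at hc
  | cons d ds ih =>
    cases c with
    | zero => simp [leftAux, maxRange]
    | succ k =>
      have hk : k < ds.length := by simpa using hc
      show (leftAux (max (prev - 1) d) ds).getD k 0 = _
      rw [ih _ k hk, maxRange_shift_getD]
      generalize maxRange (fun j => ds.getD j 0 - ((k : Int) - (j : Int))) k = M
      push_cast
      omega

theorem leftScan_getD (dp : List Int) (c : Nat) (hc : c < dp.length) :
    (leftScan dp).getD c 0 = maxRange (fun j => dp.getD j 0 - ((c : Int) - (j : Int))) c := by
  cases dp with
  | nil => simp at hc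
  | cons d ds =>
    cases c with
    | zero => simp [leftScan, maxRange]
    | succ k =>
      have hk : k < ds.length := by simpa using hc
      show (leftAux d ds).getD k 0 = _
      rw [leftAux_getD ds d k hk, maxRange_shift_getD]

theorem rightScan_ne_nil (dp : List Int) (h : dp ≠ []) : rightScan dp ≠ [] := by
  cases dp with
  | nil => simp at h
  | cons d ds =>
    simp only [rightScan]
    cases rightScan ds <;> simp

theorem rightScan_cons (d : Int) (ds : List Int) (r : Int) (rs : List Int)
    (h : rightScan ds = r :: rs) : rightScan (d :: ds) = max (r - 1) d :: r :: rs := by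
  simp only [rightScan]
  rw [h]

theorem rightScan_getD (dp : List Int) (c : Nat) (hc : c < dp.length) :
    (rightScan dp).getD c 0 =
      maxRange (fun j => dp.getD (c + j) 0 - (j : Int)) (dp.length - 1 - c) := by
  induction dp generalizing c with
  | nil => simp at hc
  | cons d ds ih =>
    cases c with
    | zero =>
      cases ds with
      | nil => simp [rightScan, maxRange]
      | cons e es =>
        have h0 : 0 < (e :: es).length := by simp
        have ihr := ih 0 h0
        obtain ⟨r, rs, hr⟩ : ∃ r rs, rightScan (e :: es) = r :: rs := by
          cases hx : rightScan (e :: es) with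
          | nil => exact absurd hx (rightScan_ne_nil (e :: es) (by simp))
          | cons r rs => exact ⟨r, rs, rfl⟩
        rw [rightScan_cons d (e :: es) r rs hr]
        simp only [List.getD_cons_zero]
        rw [hr] at ihr
        simp only [List.getD_cons_zero] at ihr
        rw [show (d :: e :: es).length - 1 - 0 = ((e :: es).length - 1 - 0) + 1 by
          simp only [List.length_cons]; omega]
        rw [maxRange_front]
        have h1 : maxRange (fun j => (d :: e :: es).getD (0 + (j + 1)) 0 - ((j + 1 : Nat) : Int))
              ((e :: es).length - 1 - 0)
            = maxRange (fun j => ((e :: es).getD (0 + j) 0 - (j : Int)) - 1)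
              ((e :: es).length - 1 - 0) := by
          apply maxRange_congr
          intro j hj
          simp only [Nat.zero_add, List.getD_cons_succ]
          push_cast
          ring
        rw [h1, maxRange_sub_const, ← ihr]
        simp
        omega
    | succ k =>
      have hk : k < ds.length := by simpa using hc
      have hds : ds ≠ [] := by cases ds <;> simp_all
      obtain ⟨r, rs, hr⟩ : ∃ r rs, rightScan ds = r :: rs := by
        cases hx : rightScan ds with
        | nil => exact absurd hx (rightScan_ne_nil ds hds)
        | cons r rs => exact ⟨r, rs, rfl⟩
      rw [rightScan_cons d ds r rs hr]
      rw [show (max (r - 1) d :: r :: rs).getD (k + 1) 0 = (r :: rs).getD k 0 from rfl]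
      rw [← hr, ih k hk]
      have hfun : (fun j => ds.getD (k + j) 0 - (j : Int))
          = (fun j => (d :: ds).getD (k + 1 + j) 0 - (j : Int)) := by
        funext j
        rw [show k + 1 + j = (k + j) + 1 by omega]
        simp
      rw [hfun, show ds.length - 1 - k = (d :: ds).length - 1 - (k + 1) by
        simp only [List.length_cons]; omega]

theorem rowBest_eq (dp : List Int) (c : Nat) (hc : c < dp.length) :
    rowBest dp c = max ((leftScan dp).getD c 0) ((rightScan dp).getD c 0) := by
  obtain ⟨m, hm⟩ : ∃ m, dp.length = m + 1 := ⟨dp.length - 1, by omega⟩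
  have hcm : c ≤ m := by omega
  unfold rowBest
  rw [hm, pyMax1_range_map]
  rw [leftScan_getD dp c hc, rightScan_getD dp c hc, hm]
  have hsplit := maxRange_split
    (fun c2 => dp.getD c2 0 - ((((c : Int) - (c2 : Int)).natAbs : Int))) c (m - c)
  rw [show c + (m - c) = m by omega] at hsplit
  rw [hsplit]
  congr 1
  · apply maxRange_congr
    intro j hj
    rw [show ((((c : Int) - (j : Int)).natAbs : Int)) = (c : Int) - (j : Int) by omega]
  · rw [show m + 1 - 1 - c = m - c by omega]
    apply maxRange_congr
    intro j hj
    rw [show ((((c : Int) - ((c + j : Nat) : Int)).natAbs : Int)) = (j : Int) by omega]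

theorem stepA_eq_stepB (dp row : List Int) : stepA dp row = stepB dp row := by
  unfold stepA stepB
  apply List.map_congr_left
  intro c hcmem
  have hc : c < dp.length := List.mem_range.mp hcmem
  rw [rowBest_eq dp c hc]

theorem foldl_stepA_eq (rest : List (List Int)) (dp : List Int) :
    rest.foldl stepA dp = rest.foldl stepB dp := by
  induction rest generalizing dp with
  | nil => rfl
  | cons r rs ih => simp only [List.foldl_cons, stepA_eq_stepB, ih]

-- ===== VERDICT (by name: the statement is the Claim_ definition above) =====
theorem maxPointsDP_spec : Claim_equal_maxPointsDP := by
  intro points _ _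
  unfold Spec_maxPointsDP
  cases points with
  | nil => rfl
  | cons dp0 rest =>
    show pyMax1 (List.foldl stepA dp0 rest) = pyMax1 (List.foldl stepB dp0 rest)
    rw [foldl_stepA_eq]
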